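-- pv_equiv track=rewrite | github.com/manonabiteboul/python | coursera_week1.py | result
-- ===== SOURCE A (Python) =====
-- import string
--
-- def result(b):
--     r=''
--     for i in b:
--         if i in capitals:
--             r=r+i
--         else:
--             r=r+'*'
--     return r
--
-- capitals = string.ascii_uppercase
-- ===== SOURCE B (Python) =====
-- import re
--
-- def result(b):
--     return re.sub(r'[^A-Z]', '*', b)
-- ===== Notes on version B (the rewrite author's own statement) =====
-- stated objective: idiomatic
-- what changed: Replaced the explicit character-by-character accumulating loop with its membership test against the 26-letter string by a single regex substitution that replaces every character outside the A-Z range with an asterisk.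
import Mathlib
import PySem

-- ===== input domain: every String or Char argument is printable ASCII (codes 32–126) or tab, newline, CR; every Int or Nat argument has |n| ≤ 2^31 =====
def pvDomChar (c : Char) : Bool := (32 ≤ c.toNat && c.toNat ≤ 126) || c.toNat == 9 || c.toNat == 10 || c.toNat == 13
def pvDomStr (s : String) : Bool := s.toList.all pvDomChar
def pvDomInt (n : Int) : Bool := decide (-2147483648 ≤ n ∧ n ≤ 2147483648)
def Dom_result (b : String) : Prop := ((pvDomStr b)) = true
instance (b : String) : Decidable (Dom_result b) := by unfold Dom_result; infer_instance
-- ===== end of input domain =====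

-- B replaces A's character-accumulating loop (membership test against the 26-letter string) with a single regex substitution re.sub(r'[^A-Z]', '*', b): more idiomatic, same output.

-- ===== PORT A =====
-- capitals = string.ascii_uppercase
def capitals : List Char := "ABCDEFGHIJKLMNOPQRSTUVWXYZ".toList

-- literal port of A: fold over the characters, appending i (if i in capitals) or '*' to the accumulator r
def result (b : String) : String :=
  String.mk (b.toList.foldl (fun r i => r ++ (if capitals.contains i then [i] else ['*'])) [])

-- port of B: re.sub(r'[^A-Z]', '*', b) — the regex engine replaces every character outside the range 'A'..'Z' by '*'
def result_alt (b : String) : String :=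
  String.mk (b.toList.map (fun c => if 'A' ≤ c && c ≤ 'Z' then c else '*'))

-- ===== PRECONDITION & SPEC =====
def Spec_result (b : String) (out : String) : Prop := out = result_alt b
instance (b : String) (out : String) : Decidable (Spec_result b out) := by unfold Spec_result; infer_instance

-- ===== CLAIM (what is proved, stated in full; the proofs are below) =====
def Claim_equal_result : Prop := ∀ (b : String), Dom_result b → Spec_result b (result b)

-- ===== LEMMAS AND PROOFS =====

-- membership in string.ascii_uppercase coincides with the regex character-class test [A-Z]
theorem mem_capitals (c : Char) : c ∈ capitals ↔ ('A' ≤ c ∧ c ≤ 'Z') := by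
  constructor
  · intro h
    simp [capitals] at h
    rcases h with h|h|h|h|h|h|h|h|h|h|h|h|h|h|h|h|h|h|h|h|h|h|h|h|h|h <;>
      subst h <;> exact ⟨by decide, by decide⟩
  · intro ⟨h1, h2⟩
    have n1 : 65 ≤ c.toNat := UInt32.le_iff_toNat_le.mp h1
    have n2 : c.toNat ≤ 90 := UInt32.le_iff_toNat_le.mp h2
    simp [capitals, Char.ext_iff, ← UInt32.toNat_inj]
    omega

-- loop invariant: A's fold equals the accumulator followed by B's per-character map
theorem result_fold (l : List Char) (acc : List Char) :
    l.foldl (fun r i => r ++ (if capitals.contains i then [i] else ['*'])) acc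
      = acc ++ l.map (fun c => if 'A' ≤ c && c ≤ 'Z' then c else '*') := by
  induction l generalizing acc with
  | nil => simp
  | cons c t ih =>
    rw [List.foldl_cons, ih]
    have hc : (if capitals.contains c then [c] else ['*'])
        = [if 'A' ≤ c && c ≤ 'Z' then c else '*'] := by
      by_cases h : 'A' ≤ c ∧ c ≤ 'Z'
      · rw [if_pos (List.contains_iff_mem.mpr ((mem_capitals c).mpr h))]
        simp [h.1, h.2]
      · rw [if_neg (fun hm => h ((mem_capitals c).mp (List.contains_iff_mem.mp hm)))]
        simp only [Bool.and_eq_true, decide_eq_true_eq]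
        rw [if_neg h]
    rw [hc]
    simp

-- ===== VERDICT (by name: the statement is the Claim_ definition above) =====
theorem result_spec : Claim_equal_result := by
  intro b _
  unfold Spec_result result result_alt
  rw [result_fold]
  simp
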